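-- pv_equiv track=rewrite | github.com/alvaradoglza/biotech-trading-dashboard | pipeline/fetch_fda.py | _build_name_lookup
-- ===== SOURCE A (Python) =====
-- def _build_name_lookup(
--     tickers: list[str],
--     ticker_to_company: dict[str, str],
-- ) -> tuple[dict, dict]:
--     """Build (full_name_lookup, prefix_lookup) for scored company matching.
--
--     When two tickers share the same normalized company name (e.g. ALVO / ALVOW
--     warrants), keep the shorter ticker (base stock) so warrants don't shadow it.
--     """
--     lookup: dict[str, str] = {}        # normalized full name → ticker
--     prefix_lookup: dict[str, str] = {} # first word (≥6 chars) → ticker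
--     for ticker in tickers:
--         company = ticker_to_company.get(ticker, "")
--         if not company:
--             continue
--         normalized = _normalize(company)
--         if len(normalized) >= 3:
--             # Prefer shorter ticker (base stock beats warrant like ALVOW)
--             existing = lookup.get(normalized)
--             if existing is None or len(ticker) < len(existing):
--                 lookup[normalized] = ticker
--         parts = normalized.split()
--         if parts and len(parts[0]) >= 6:
--             existing_pre = prefix_lookup.get(parts[0])
--             if existing_pre is None or len(ticker) < len(existing_pre):
--                 prefix_lookup[parts[0]] = ticker
--     return lookup, prefix_lookup
--
-- def _normalize(name: str) -> str:
--     """Strip legal suffixes and lowercase a company name.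
--
--     Only strips a suffix if the result remains ≥3 chars, so short names like
--     'ANI Pharmaceuticals' → 'ani' are preserved rather than dropped.
--     """
--     name = name.lower().strip()
--     for suffix in [
--         " incorporated", " inc.", " inc", " corporation", " corp.", " corp",
--         " limited", " ltd.", " ltd", " llc", " plc", " sa", " ag", " nv",
--         " therapeutics", " pharmaceutical", " pharmaceuticals",
--         " biosciences", " bioscience", " biopharma", " biopharmaceuticals",
--         " biopharmaceutical", " oncology", " genomics", " sciences", " science",
--         " health", " healthcare", " medical", " medicine", " labs", " laboratory",
--         " laboratories",
--     ]:
--         if name.endswith(suffix):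
--             candidate = name[: -len(suffix)].strip()
--             if len(candidate) >= 3:
--                 name = candidate
--     return name.strip()
-- ===== SOURCE B (Python) =====
-- def _build_name_lookup(
--     tickers: list[str],
--     ticker_to_company: dict[str, str],
-- ) -> tuple[dict, dict]:
--     """Collect every candidate ticker per key, then pick the best per key.
--
--     min(..., key=len) returns the FIRST shortest candidate, which is exactly
--     the 'keep the shorter ticker, ties to the earlier one' rule.
--     """
--     names: list[tuple[str, str]] = []     # (normalized full name, ticker) candidates
--     prefixes: list[tuple[str, str]] = []  # (first word >=6 chars, ticker) candidates
--     for ticker in tickers: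
--         company = ticker_to_company.get(ticker, "")
--         if not company:
--             continue
--         normalized = _normalize(company)
--         if len(normalized) >= 3:
--             names.append((normalized, ticker))
--         parts = normalized.split()
--         if parts and len(parts[0]) >= 6:
--             prefixes.append((parts[0], ticker))
--     return _best_by_key(names), _best_by_key(prefixes)
--
--
-- def _best_by_key(pairs: list[tuple[str, str]]) -> dict:
--     """Group candidate tickers by key, then keep the first shortest one."""
--     groups: dict[str, list[str]] = {}
--     for key, ticker in pairs:
--         groups.setdefault(key, []).append(ticker)
--     return {key: min(ts, key=len) for key, ts in groups.items()}
--
--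
-- def _normalize(name: str) -> str:
--     name = name.lower().strip()
--     for suffix in [
--         " incorporated", " inc.", " inc", " corporation", " corp.", " corp",
--         " limited", " ltd.", " ltd", " llc", " plc", " sa", " ag", " nv",
--         " therapeutics", " pharmaceutical", " pharmaceuticals",
--         " biosciences", " bioscience", " biopharma", " biopharmaceuticals",
--         " biopharmaceutical", " oncology", " genomics", " sciences", " science",
--         " health", " healthcare", " medical", " medicine", " labs", " laboratory",
--         " laboratories",
--     ]:
--         if name.endswith(suffix):
--             candidate = name[: -len(suffix)].strip()
--             if len(candidate) >= 3:
--                 name = candidate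
--     return name.strip()
-- ===== Notes on version B (the rewrite author's own statement) =====
-- stated objective: alternative
-- what changed: A maintains both dicts online, comparing each new ticker's length against the stored one on every hit; B first collects all (key, ticker) candidate pairs, groups them per key, and then picks min(tickers, key=len) per group (first-shortest = A's strict-< keep-first rule).
import Mathlib
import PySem

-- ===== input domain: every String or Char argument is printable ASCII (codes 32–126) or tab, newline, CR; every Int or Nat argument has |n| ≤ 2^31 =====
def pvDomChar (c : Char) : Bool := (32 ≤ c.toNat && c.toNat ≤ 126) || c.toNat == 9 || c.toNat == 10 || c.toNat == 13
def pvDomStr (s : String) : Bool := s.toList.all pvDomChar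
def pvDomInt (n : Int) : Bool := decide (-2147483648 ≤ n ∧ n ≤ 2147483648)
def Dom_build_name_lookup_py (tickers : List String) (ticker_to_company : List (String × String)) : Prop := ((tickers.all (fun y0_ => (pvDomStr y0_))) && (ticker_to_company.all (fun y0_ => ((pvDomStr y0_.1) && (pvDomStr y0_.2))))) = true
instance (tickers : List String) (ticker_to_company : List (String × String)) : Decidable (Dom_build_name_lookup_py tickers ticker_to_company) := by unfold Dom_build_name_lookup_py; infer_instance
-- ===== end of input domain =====

set_option maxRecDepth 8000


-- B replaces A's online "keep the shorter ticker" dict updates by collecting all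
-- candidate (key, ticker) pairs, grouping them per key, and taking min(·, key=len)
-- per group (objective: alternative decomposition, same cost).

-- _normalize (helper identical in Source A and Source B, used by both ports)
def pvSuffixes : List String := [
  " incorporated", " inc.", " inc", " corporation", " corp.", " corp",
  " limited", " ltd.", " ltd", " llc", " plc", " sa", " ag", " nv",
  " therapeutics", " pharmaceutical", " pharmaceuticals",
  " biosciences", " bioscience", " biopharma", " biopharmaceuticals",
  " biopharmaceutical", " oncology", " genomics", " sciences", " science",
  " health", " healthcare", " medical", " medicine", " labs", " laboratory",
  " laboratories"]

def pyNormalize (name : String) : String :=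
  let name := PySem.Str.strip (PySem.Str.lower name)
  let name := pvSuffixes.foldl (fun name suffix =>
    if PySem.Str.endswith name suffix then
      let candidate := PySem.Str.strip (PySem.Str.slice name none (some (-(PySem.Str.len suffix))))
      if 3 ≤ PySem.Str.len candidate then candidate else name
    else name) name
  PySem.Str.strip name

-- ===== PORT A =====
-- loop body of A's single for-loop: state = (lookup, prefix_lookup)
def pvStepA (ticker_to_company : List (String × String))
    (st : PySem.Dict String String × PySem.Dict String String) (ticker : String) :
    PySem.Dict String String × PySem.Dict String String :=
  let company := (PySem.Dict.mk ticker_to_company).getD ticker ""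
  if company = "" then st
  else
    let normalized := pyNormalize company
    let lookup :=
      if 3 ≤ PySem.Str.len normalized then
        match st.1.get? normalized with
        | none => st.1.insert normalized ticker
        | some existing =>
            if PySem.Str.len ticker < PySem.Str.len existing then st.1.insert normalized ticker
            else st.1
      else st.1
    let parts := PySem.Str.split₀ normalized
    let prefix_lookup :=
      match parts with
      | [] => st.2
      | p :: _ =>
          if 6 ≤ PySem.Str.len p then
            match st.2.get? p with
            | none => st.2.insert p ticker
            | some existing_pre =>
                if PySem.Str.len ticker < PySem.Str.len existing_pre then st.2.insert p ticker
                else st.2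
          else st.2
      (lookup, prefix_lookup)

def build_name_lookup_py (tickers : List String) (ticker_to_company : List (String × String)) : (List (String × String)) × (List (String × String)) :=
  let r := tickers.foldl (pvStepA ticker_to_company) (PySem.Dict.empty, PySem.Dict.empty)
  (r.1.items, r.2.items)

-- ===== PORT B =====
-- loop body of B's collection loop: state = (names, prefixes) candidate lists
def pvStepB (ticker_to_company : List (String × String))
    (st : List (String × String) × List (String × String)) (ticker : String) :
    List (String × String) × List (String × String) :=
  let company := (PySem.Dict.mk ticker_to_company).getD ticker ""
  if company = "" then st
  else
    let normalized := pyNormalize company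
    let names := if 3 ≤ PySem.Str.len normalized then st.1 ++ [(normalized, ticker)] else st.1
    let parts := PySem.Str.split₀ normalized
    let prefixes :=
      match parts with
      | [] => st.2
      | p :: _ => if 6 ≤ PySem.Str.len p then st.2 ++ [(p, ticker)] else st.2
    (names, prefixes)

-- _best_by_key: group tickers per key, then dict comprehension taking min(ts, key=len)
def pvGroups (pairs : List (String × String)) : PySem.Dict String (List String) :=
  pairs.foldl (fun g p => g.modify p.1 [] (fun ts => ts ++ [p.2])) PySem.Dict.empty

def pvBestByKey (pairs : List (String × String)) : PySem.Dict String String :=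
  (pvGroups pairs).items.foldl
    (fun d p =>
      d.insert p.1 (match PySem.List.min? p.2 PySem.Str.len with
                    | some m => m
                    | none => ""))  -- min() over an empty group is unreachable: every group is nonempty
    PySem.Dict.empty

def build_name_lookup_py_alt (tickers : List String) (ticker_to_company : List (String × String)) : (List (String × String)) × (List (String × String)) :=
  let st := tickers.foldl (pvStepB ticker_to_company) ([], [])
  ((pvBestByKey st.1).items, (pvBestByKey st.2).items)

-- ===== PRECONDITION & SPEC =====
def Spec_build_name_lookup_py (tickers : List String) (ticker_to_company : List (String × String)) (out : (List (String × String)) × (List (String × String))) : Prop := out = build_name_lookup_py_alt tickers ticker_to_company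
instance (tickers : List String) (ticker_to_company : List (String × String)) (out : (List (String × String)) × (List (String × String))) : Decidable (Spec_build_name_lookup_py tickers ticker_to_company out) := by unfold Spec_build_name_lookup_py; infer_instance

-- ===== CLAIM (what is proved, stated in full; the proofs are below) =====
def Claim_equal_build_name_lookup_py : Prop := ∀ (tickers : List String) (ticker_to_company : List (String × String)), Dom_build_name_lookup_py tickers ticker_to_company → Spec_build_name_lookup_py tickers ticker_to_company (build_name_lookup_py tickers ticker_to_company)

-- ===== LEMMAS AND PROOFS =====

-- the (key, ticker) candidate each ticker contributes to the name / prefix dict (proof-only helpers)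
def pvE1 (ticker_to_company : List (String × String)) (ticker : String) : Option (String × String) :=
  let company := (PySem.Dict.mk ticker_to_company).getD ticker ""
  if company = "" then none
  else
    let normalized := pyNormalize company
    if 3 ≤ PySem.Str.len normalized then some (normalized, ticker) else none

def pvE2 (ticker_to_company : List (String × String)) (ticker : String) : Option (String × String) :=
  let company := (PySem.Dict.mk ticker_to_company).getD ticker ""
  if company = "" then none
  else
    let normalized := pyNormalize company
    match PySem.Str.split₀ normalized with
    | [] => none
    | p :: _ => if 6 ≤ PySem.Str.len p then some (p, ticker) else none

-- A's per-candidate dict update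
def pvUpd (d : PySem.Dict String String) (p : String × String) : PySem.Dict String String :=
  match d.get? p.1 with
  | none => d.insert p.1 p.2
  | some existing =>
      if PySem.Str.len p.2 < PySem.Str.len existing then d.insert p.1 p.2 else d

-- the tickers competing for key k among the candidate pairs ps
def pvCands (ps : List (String × String)) (k : String) : List String :=
  (ps.filter (fun p => p.1 == k)).map (fun p => p.2)

def pvBestVal (ts : List String) : String :=
  match PySem.List.min? ts PySem.Str.len with
  | some m => m
  | none => ""

theorem pvStepA_eq (t2c : List (String × String))
    (st : PySem.Dict String String × PySem.Dict String String) (t : String) :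
    pvStepA t2c st t =
      ((match pvE1 t2c t with | none => st.1 | some p => pvUpd st.1 p),
       (match pvE2 t2c t with | none => st.2 | some p => pvUpd st.2 p)) := by
  simp only [pvStepA, pvE1, pvE2, pvUpd]
  by_cases hc : (PySem.Dict.mk t2c).getD t "" = ""
  · simp only [if_pos hc]
  · simp only [if_neg hc]
    by_cases h3 : 3 ≤ PySem.Str.len (pyNormalize ((PySem.Dict.mk t2c).getD t ""))
    · simp only [if_pos h3]
      cases hp : PySem.Str.split₀ (pyNormalize ((PySem.Dict.mk t2c).getD t "")) with
      | nil => rfl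
      | cons p rest => by_cases h6 : 6 ≤ p.length <;> simp [PySem.Str.len, h6]
    · simp only [if_neg h3]
      cases hp : PySem.Str.split₀ (pyNormalize ((PySem.Dict.mk t2c).getD t "")) with
      | nil => rfl
      | cons p rest => by_cases h6 : 6 ≤ p.length <;> simp [PySem.Str.len, h6]

theorem pvStepB_eq (t2c : List (String × String))
    (st : List (String × String) × List (String × String)) (t : String) :
    pvStepB t2c st t =
      ((match pvE1 t2c t with | none => st.1 | some p => st.1 ++ [p]),
       (match pvE2 t2c t with | none => st.2 | some p => st.2 ++ [p])) := by
  simp only [pvStepB, pvE1, pvE2]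
  by_cases hc : (PySem.Dict.mk t2c).getD t "" = ""
  · simp only [if_pos hc]
  · simp only [if_neg hc]
    by_cases h3 : 3 ≤ PySem.Str.len (pyNormalize ((PySem.Dict.mk t2c).getD t ""))
    · simp only [if_pos h3]
      cases hp : PySem.Str.split₀ (pyNormalize ((PySem.Dict.mk t2c).getD t "")) with
      | nil => rfl
      | cons p rest => by_cases h6 : 6 ≤ p.length <;> simp [PySem.Str.len, h6]
    · simp only [if_neg h3]
      cases hp : PySem.Str.split₀ (pyNormalize ((PySem.Dict.mk t2c).getD t "")) with
      | nil => rfl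
      | cons p rest => by_cases h6 : 6 ≤ p.length <;> simp [PySem.Str.len, h6]

theorem pvFoldA_eq (t2c : List (String × String)) (tickers : List String)
    (d1 d2 : PySem.Dict String String) :
    tickers.foldl (pvStepA t2c) (d1, d2) =
      ((tickers.filterMap (pvE1 t2c)).foldl pvUpd d1,
       (tickers.filterMap (pvE2 t2c)).foldl pvUpd d2) := by
  induction tickers generalizing d1 d2 with
  | nil => rfl
  | cons t ts ih =>
      simp only [List.foldl_cons, List.filterMap_cons, pvStepA_eq]
      cases h1 : pvE1 t2c t <;> cases h2 : pvE2 t2c t <;> simp [ih]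

theorem pvFoldB_eq (t2c : List (String × String)) (tickers : List String)
    (l1 l2 : List (String × String)) :
    tickers.foldl (pvStepB t2c) (l1, l2) =
      (l1 ++ tickers.filterMap (pvE1 t2c), l2 ++ tickers.filterMap (pvE2 t2c)) := by
  induction tickers generalizing l1 l2 with
  | nil => simp
  | cons t ts ih =>
      simp only [List.foldl_cons, List.filterMap_cons, pvStepB_eq]
      cases h1 : pvE1 t2c t <;> cases h2 : pvE2 t2c t <;> simp [ih]

theorem pvMin?_snoc {α : Type} (ts : List α) (t : α) (key : α → Int) :
    PySem.List.min? (ts ++ [t]) key =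
      match PySem.List.min? ts key with
      | none => some t
      | some m => if key t < key m then some t else some m := by
  simp only [PySem.List.min?, List.foldl_append, List.foldl_cons, List.foldl_nil]
  rfl

theorem pvFoldlMin_isSome {α : Type} (l : List α) (key : α → Int) (a : α) :
    (l.foldl (fun acc x => match acc with
        | none => some x
        | some m => if key x < key m then some x else some m) (some a)).isSome = true := by
  induction l generalizing a with
  | nil => rfl
  | cons x xs ih =>
      simp only [List.foldl_cons]
      by_cases h : key x < key a <;> simp only [if_pos, h, reduceIte] <;> exact ih _

theorem pvMin?_isSome {α : Type} (l : List α) (key : α → Int) (h : l ≠ []) :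
    (PySem.List.min? l key).isSome = true := by
  cases l with
  | nil => exact absurd rfl h
  | cons a t => simpa [PySem.List.min?] using pvFoldlMin_isSome t key a

theorem pvCands_snoc (ps : List (String × String)) (p : String × String) (k : String) :
    pvCands (ps ++ [p]) k = pvCands ps k ++ (if p.1 = k then [p.2] else []) := by
  unfold pvCands
  by_cases h : p.1 = k
  · have hb : (p.1 == k) = true := beq_iff_eq.mpr h
    simp [List.filter_append, List.filter, h]
  · have hb : (p.1 == k) = false := beq_false_of_ne h
    simp [List.filter_append, List.filter, h, hb]

theorem pvCands_nil_of_not_mem (ps : List (String × String)) (k : String)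
    (h : k ∉ ps.map (fun p => p.1)) : pvCands ps k = [] := by
  unfold pvCands
  have h0 : ps.filter (fun p => p.1 == k) = [] := by
    rw [List.filter_eq_nil_iff]
    intro p hp hbeq
    exact h (List.mem_map.mpr ⟨p, hp, eq_of_beq hbeq⟩)
  rw [h0]
  rfl

theorem pvCands_ne_nil_of_mem (ps : List (String × String)) (k : String)
    (h : k ∈ ps.map (fun p => p.1)) : pvCands ps k ≠ [] := by
  obtain ⟨p, hp, hk⟩ := List.mem_map.mp h
  unfold pvCands
  intro hc
  rw [List.map_eq_nil_iff, List.filter_eq_nil_iff] at hc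
  exact hc p hp (by simp [hk])

-- the shape of A's accumulated dict after processing candidate list ps
theorem pvUpdFold_items (ps : List (String × String)) :
    (ps.foldl pvUpd PySem.Dict.empty).items =
      (PySem.Set.ofList (ps.map (fun p => p.1))).map (fun k => (k, pvBestVal (pvCands ps k))) := by
  induction ps using List.reverseRecOn with
  | nil => rfl
  | append_singleton ps p ih =>
      rw [List.foldl_append, List.foldl_cons, List.foldl_nil]
      set D := ps.foldl pvUpd PySem.Dict.empty with hD
      set K := PySem.Set.ofList (ps.map (fun p => p.1)) with hK
      have hkeys : D.keys = K := by
        simp only [PySem.Dict.keys, ih, List.map_map]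
        have hid : ((fun x : String × String => x.1) ∘ fun k => (k, pvBestVal (pvCands ps k))) = id := rfl
        rw [hid, List.map_id]
      have hnodK : K.Nodup := PySem.Set.nodup_ofList _
      have hnod : D.keys.Nodup := by rw [hkeys]; exact hnodK
      have hKsnoc : PySem.Set.ofList ((ps ++ [p]).map (fun p => p.1)) =
          if p.1 ∈ ps.map (fun p => p.1) then K else K ++ [p.1] := by
        rw [List.map_append, PySem.Set.ofList_eq_foldl, List.foldl_append,
          ← PySem.Set.ofList_eq_foldl]
        simp only [List.map_cons, List.map_nil, List.foldl_cons, List.foldl_nil]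
        by_cases hmem : p.1 ∈ ps.map (fun p => p.1)
        · rw [if_pos hmem, PySem.Set.add_of_mem ((PySem.Set.mem_ofList _ _).mpr hmem)]
        · rw [if_neg hmem,
            PySem.Set.add_of_not_mem (fun hc => hmem ((PySem.Set.mem_ofList _ _).mp hc))]
      by_cases hmem : p.1 ∈ ps.map (fun p => p.1)
      · -- key already present: the pair at p.1 is updated in place
        have hkK : p.1 ∈ K := (PySem.Set.mem_ofList _ _).mpr hmem
        have hitem : (p.1, pvBestVal (pvCands ps p.1)) ∈ D.items := by
          rw [ih]; exact List.mem_map.mpr ⟨p.1, hkK, rfl⟩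
        have hget : D.get? p.1 = some (pvBestVal (pvCands ps p.1)) :=
          PySem.Dict.get?_of_mem_items D hitem hnod
        have hcne : pvCands ps p.1 ≠ [] := pvCands_ne_nil_of_mem ps p.1 hmem
        obtain ⟨m, hm⟩ := Option.isSome_iff_exists.mp (pvMin?_isSome _ PySem.Str.len hcne)
        have hbv : pvBestVal (pvCands ps p.1) = m := by unfold pvBestVal; rw [hm]
        have hbv' : pvBestVal (pvCands (ps ++ [p]) p.1) =
            if PySem.Str.len p.2 < PySem.Str.len m then p.2 else m := by
          unfold pvBestVal
          rw [pvCands_snoc, if_pos rfl, pvMin?_snoc, hm]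
          show (match (if PySem.Str.len p.2 < PySem.Str.len m then some p.2 else some m : Option String) with
                | some m => m | none => "") = if PySem.Str.len p.2 < PySem.Str.len m then p.2 else m
          split_ifs <;> rfl
        have hcont : D.contains p.1 = true :=
          (PySem.Dict.contains_iff_mem_keys D p.1).mpr (by rw [hkeys]; exact hkK)
        rw [hKsnoc, if_pos hmem]
        unfold pvUpd
        simp only [hget, hbv]
        by_cases hlt : PySem.Str.len p.2 < PySem.Str.len m
        · rw [if_pos hlt]
          rw [PySem.Dict.items_insert_of_contains D p.2 hcont, ih, List.map_map]
          apply List.map_congr_left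
          intro k hkmem
          by_cases hk : k = p.1
          · subst hk
            simp only [Function.comp_apply, beq_self_eq_true, reduceIte]
            rw [hbv', if_pos hlt]
          · have hbk : (k == p.1) = false := beq_false_of_ne hk
            simp only [Function.comp_apply, hbk, Bool.false_eq_true, reduceIte]
            rw [pvCands_snoc, if_neg (fun h => hk h.symm)]
            simp
        · rw [if_neg hlt, ih]
          apply List.map_congr_left
          intro k hkmem
          by_cases hk : k = p.1
          · subst hk
            rw [hbv', if_neg hlt, hbv]
          · rw [pvCands_snoc, if_neg (fun h => hk h.symm)]
            simp
      · -- fresh key: appended at the end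
        have hkK : p.1 ∉ K := fun hc => hmem ((PySem.Set.mem_ofList _ _).mp hc)
        have hget : D.get? p.1 = none := by
          rw [PySem.Dict.get?_eq_none_iff_not_mem_keys, hkeys]; exact hkK
        have hcont : D.contains p.1 = false := by
          rw [PySem.Dict.contains_eq_isSome_get?, hget]; rfl
        unfold pvUpd
        simp only [hget]
        rw [PySem.Dict.items_insert_of_not_contains D p.2 hcont, ih, hKsnoc, if_neg hmem,
          List.map_append]
        congr 1
        · apply List.map_congr_left
          intro k hkmem
          rw [pvCands_snoc, if_neg (fun h => hkK (by rw [h]; exact hkmem))]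
          simp
        · simp only [List.map_cons, List.map_nil]
          have hcp : pvCands (ps ++ [p]) p.1 = [p.2] := by
            rw [pvCands_snoc, if_pos rfl, pvCands_nil_of_not_mem ps p.1 hmem]
            rfl
          rw [hcp]
          unfold pvBestVal
          simp [PySem.List.min?]

-- B's pvBestByKey produces exactly the same items list
theorem pvBestByKey_items (ps : List (String × String)) :
    (pvBestByKey ps).items =
      (PySem.Set.ofList (ps.map (fun p => p.1))).map (fun k => (k, pvBestVal (pvCands ps k))) := by
  have hkeys : (pvGroups ps).keys = PySem.Set.ofList (ps.map (fun p => p.1)) := by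
    rw [pvGroups, PySem.Dict.keys_foldl_modify_key ps (fun p => p.1) []
      (fun _ p => fun ts => ts ++ [p.2])]
    simp [PySem.Set.update_nil_left]
  have hnod : (pvGroups ps).keys.Nodup := by
    rw [hkeys]; exact PySem.Set.nodup_ofList _
  have hgetD : ∀ k, (pvGroups ps).getD k [] = pvCands ps k := by
    intro k
    rw [pvGroups, PySem.Dict.getD_foldl_modify_append ps PySem.Dict.empty k]
    simp [pvCands, PySem.Dict.getD_empty]
  have hitems : (pvGroups ps).items = (pvGroups ps).keys.map (fun k => (k, pvCands ps k)) := by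
    rw [PySem.Dict.items_eq_map_keys (pvGroups ps) hnod []]
    exact List.map_congr_left (fun k _ => by rw [hgetD k])
  unfold pvBestByKey
  have hfresh := PySem.Dict.items_foldl_insert_fresh (pvGroups ps).items
      (fun p : String × List String => p.1)
      (fun p : String × List String =>
        match PySem.List.min? p.2 PySem.Str.len with | some m => m | none => "")
      PySem.Dict.empty (fun a _ => PySem.Dict.contains_empty _)
      (by rw [show (pvGroups ps).items.map (fun p : String × List String => p.1) =
        (pvGroups ps).keys from rfl]; exact hnod)
  simp only [] at hfresh
  rw [hfresh]
  rw [hitems, hkeys, List.map_map]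
  simp only [show (PySem.Dict.empty : PySem.Dict String String).items = [] from rfl,
    List.nil_append]
  apply List.map_congr_left
  intro k _
  simp [Function.comp, pvBestVal]

-- ===== VERDICT (by name: the statement is the Claim_ definition above) =====
theorem build_name_lookup_py_spec : Claim_equal_build_name_lookup_py := by
  intro tickers t2c _
  unfold Spec_build_name_lookup_py build_name_lookup_py build_name_lookup_py_alt
  rw [pvFoldA_eq, pvFoldB_eq]
  simp only [List.nil_append]
  rw [pvUpdFold_items, pvUpdFold_items, pvBestByKey_items, pvBestByKey_items]
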